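-- pv_equiv track=rewrite | github.com/scarlanathan/Epitech_2026 | jour2.py | taskk
-- ===== SOURCE A (Python) =====
-- def taskk(nombrede1,puissance):
--      i=0
--      temp=0
--      resultat=0
--      for i in range (nombrede1):
--              temp = 10**i + temp
--              resultat = temp + resultat
--              print (resultat)
--      return resultat**puissance
-- ===== SOURCE B (Python) =====
-- def taskk(nombrede1, puissance):
--     # print the same cumulative repunit sums via the closed form
--     for i in range(nombrede1):
--         print((10**(i+2) - 10 - 9*(i+1)) // 81)
--     # final result computed directly, no accumulation
--     resultat = (10**(nombrede1+1) - 10 - 9*nombrede1) // 81 if nombrede1 > 0 else 0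
--     return resultat**puissance
-- ===== Notes on version B (the rewrite author's own statement) =====
-- stated objective: alternative
-- what changed: B drops both running accumulators: the returned value is computed in closed form (10**(n+1)-10-9*n)//81 directly from nombrede1 (0 if the loop is empty), and the per-iteration prints use the same repunit-sum identity instead of accumulation.
-- outside the precondition, e.g. on taskk(1, -1): A returns 1.0, B returns 1.0; on taskk(0, -1): A raises ZeroDivisionError, B raises ZeroDivisionError
import Mathlib
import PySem

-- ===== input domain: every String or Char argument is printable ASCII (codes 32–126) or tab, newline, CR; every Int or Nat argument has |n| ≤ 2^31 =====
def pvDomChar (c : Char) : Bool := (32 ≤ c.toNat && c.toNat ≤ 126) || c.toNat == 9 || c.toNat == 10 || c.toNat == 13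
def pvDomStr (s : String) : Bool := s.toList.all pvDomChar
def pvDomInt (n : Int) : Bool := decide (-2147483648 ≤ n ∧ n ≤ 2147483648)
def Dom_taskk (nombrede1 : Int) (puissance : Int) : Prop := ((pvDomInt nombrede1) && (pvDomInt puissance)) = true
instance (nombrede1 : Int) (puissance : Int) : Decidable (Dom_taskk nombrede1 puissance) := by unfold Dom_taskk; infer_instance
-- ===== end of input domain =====

-- B replaces the loop's accumulation by a direct closed-form computation of the final repunit
-- sum; the equivalence proved is about the RETURN value only (both Pythons print each sum).

-- ===== PORT A =====
def taskk (nombrede1 : Int) (puissance : Int) : Int :=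
  let s := (PySem.List.pyRange 0 nombrede1 1).foldl
    (fun (s : Int × Int) i => ((10:Int) ^ i.toNat + s.1, ((10:Int) ^ i.toNat + s.1) + s.2))
    (0, 0)
  s.2 ^ puissance.toNat

-- ===== PORT B =====
def taskk_alt (nombrede1 : Int) (puissance : Int) : Int :=
  let resultat : Int :=
    if 0 < nombrede1 then
      PySem.Int.floordiv ((10:Int) ^ (nombrede1 + 1).toNat - 10 - 9 * nombrede1) 81
    else 0
  resultat ^ puissance.toNat

-- ===== PRECONDITION & SPEC =====
-- Pre_ excludes puissance < 0, where Python's ** leaves the declared type: A returns a float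
-- (e.g. 1.0 at (1,-1)) or raises ZeroDivisionError (at (0,-1)); B behaves the same there.
def Pre_taskk (_nombrede1 : Int) (puissance : Int) : Prop := 0 ≤ puissance
instance (nombrede1 : Int) (puissance : Int) : Decidable (Pre_taskk nombrede1 puissance) := by unfold Pre_taskk; infer_instance
def pvWitness_taskk : Int × Int := (3, 2)
def Spec_taskk (nombrede1 : Int) (puissance : Int) (out : Int) : Prop := out = taskk_alt nombrede1 puissance
instance (nombrede1 : Int) (puissance : Int) (out : Int) : Decidable (Spec_taskk nombrede1 puissance out) := by unfold Spec_taskk; infer_instance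

-- ===== CLAIM (what is proved, stated in full; the proofs are below) =====
def Claim_equal_taskk : Prop := ∀ (nombrede1 : Int) (puissance : Int), Dom_taskk nombrede1 puissance → Pre_taskk nombrede1 puissance → Spec_taskk nombrede1 puissance (taskk nombrede1 puissance)

-- ===== LEMMAS AND PROOFS =====

-- closed forms of A's accumulators after n iterations
def pvT : Nat → Int
  | 0 => 0
  | n + 1 => (10:Int) ^ n + pvT n

def pvR : Nat → Int
  | 0 => 0
  | n + 1 => ((10:Int) ^ n + pvT n) + pvR n

lemma pvA_fold (n : Nat) :
    (PySem.List.pyRange 0 (n : Int) 1).foldl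
      (fun (s : Int × Int) i => ((10:Int) ^ i.toNat + s.1, ((10:Int) ^ i.toNat + s.1) + s.2))
      (0, 0) = (pvT n, pvR n) := by
  induction n with
  | zero => simp [PySem.List.pyRange_one_eq_nil, pvT, pvR]
  | succ n ih =>
    have h : ((n : Int) + 1) = ((n + 1 : Nat) : Int) := by push_cast; ring
    rw [← h, PySem.List.pyRange_one_succ_right (by positivity), List.foldl_append, ih]
    simp [pvT, pvR]

lemma pvT_closed (n : Nat) : 9 * pvT n = (10:Int) ^ n - 1 := by
  induction n with
  | zero => simp [pvT]
  | succ n ih => rw [pvT]; rw [pow_succ]; linarith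

lemma pvR_closed (n : Nat) : 81 * pvR n = (10:Int) ^ (n + 1) - 10 - 9 * n := by
  induction n with
  | zero => simp [pvR]
  | succ n ih =>
    have ht := pvT_closed n
    rw [pvR]
    rw [pow_succ (10:Int) (n + 1), pow_succ (10:Int) n] at *
    push_cast
    linarith

lemma pvR_fdiv (n : Nat) :
    PySem.Int.floordiv ((10:Int) ^ (n + 1) - 10 - 9 * n) 81 = pvR n := by
  rw [← pvR_closed n]
  simp [PySem.Int.floordiv]

-- ===== VERDICT (by name: the statement is the Claim_ definition above) =====
theorem taskk_spec : Claim_equal_taskk := by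
  intro n p _ _
  unfold Spec_taskk taskk taskk_alt
  by_cases hn : n ≤ 0
  · rw [PySem.List.pyRange_one_eq_nil hn]
    simp [if_neg (by omega : ¬ 0 < n)]
  · have hN : n = ((n.toNat : Nat) : Int) := by omega
    rw [hN, pvA_fold]
    rw [if_pos (by omega : (0:Int) < ((n.toNat : Nat) : Int))]
    have h1 : (((n.toNat : Nat) : Int) + 1).toNat = n.toNat + 1 := by omega
    rw [h1, pvR_fdiv]
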